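-- pv_equiv track=rewrite | github.com/JINS-DE/Data-Structure-and-Algorithm | 프로그래머스/1/42862. 체육복/체육복.py | solution
-- ===== SOURCE A (Python) =====
-- def solution(n, lost, reserve):
--     # 여벌이 있지만 도난당한 학생을 먼저 제외 (차집합 사용)
--     lost_set = set(lost) - set(reserve)
--     reserve_set = set(reserve) - set(lost)
--
--     # 체육복을 빌릴 수 있는 경우 찾기
--     for miss in sorted(lost_set):
--         if miss - 1 in reserve_set:  # 앞 번호 학생이 여벌 있음
--             reserve_set.remove(miss - 1)
--             lost_set.remove(miss)
--         elif miss + 1 in reserve_set:  # 뒷 번호 학생이 여벌 있음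
--             reserve_set.remove(miss + 1)
--             lost_set.remove(miss)
--
--     return n - len(lost_set)  # 도난당한 학생 중 체육복을 못 빌린 학생 제외
-- ===== SOURCE B (Python) =====
-- def solution(n, lost, reserve):
--     # Two-pointer merge of the two sorted difference lists instead of A's
--     # per-student set-mutation greedy; counts matched pairs directly.
--     L = sorted(set(lost) - set(reserve))
--     R = sorted(set(reserve) - set(lost))
--     i = j = matched = 0
--     while i < len(L) and j < len(R):
--         if abs(L[i] - R[j]) <= 1:
--             matched += 1
--             i += 1
--             j += 1
--         elif R[j] < L[i]:
--             j += 1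
--         else:
--             i += 1
--     return n - len(L) + matched
-- ===== Notes on version B (the rewrite author's own statement) =====
-- stated objective: alternative
-- what changed: Replaces A's greedy that mutates two sets while scanning sorted lost numbers by a two-pointer merge of the two sorted difference lists, counting matched (|l-r|<=1) pairs directly with O(1) extra state.
import Mathlib
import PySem

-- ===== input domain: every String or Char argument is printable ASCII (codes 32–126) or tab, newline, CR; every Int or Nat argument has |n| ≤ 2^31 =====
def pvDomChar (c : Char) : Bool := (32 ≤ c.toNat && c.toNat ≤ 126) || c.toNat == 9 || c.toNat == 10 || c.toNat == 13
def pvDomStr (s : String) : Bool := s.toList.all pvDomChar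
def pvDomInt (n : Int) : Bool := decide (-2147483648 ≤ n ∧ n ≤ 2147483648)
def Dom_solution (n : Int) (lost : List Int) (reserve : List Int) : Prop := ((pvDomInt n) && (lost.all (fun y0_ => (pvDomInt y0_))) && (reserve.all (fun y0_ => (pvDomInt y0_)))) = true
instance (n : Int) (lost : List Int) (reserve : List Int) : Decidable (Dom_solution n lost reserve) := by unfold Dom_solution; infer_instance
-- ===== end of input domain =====

-- B replaces A's set-mutation greedy over the lost numbers by a two-pointer
-- merge of the two sorted difference lists (alternative algorithm; same result).

-- ===== PORT A =====
-- Python's set.remove is ported as Set.discard: at each call site the removed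
-- element is provably a member (miss is drawn from lost_set; miss∓1 was just
-- tested for membership in reserve_set), where remove and discard coincide,
-- so no KeyError is reachable and A is total.
def solution (n : Int) (lost : List Int) (reserve : List Int) : Int :=
  let lost_set : PySem.Set Int := PySem.Set.diff (PySem.Set.ofList lost) (PySem.Set.ofList reserve)
  let reserve_set : PySem.Set Int := PySem.Set.diff (PySem.Set.ofList reserve) (PySem.Set.ofList lost)
  let st := (PySem.List.sorted lost_set (fun x => x) false).foldl
    (fun (st : PySem.Set Int × PySem.Set Int) miss =>
      if PySem.Set.contains st.2 (miss - 1) then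
        (PySem.Set.discard st.1 miss, PySem.Set.discard st.2 (miss - 1))
      else if PySem.Set.contains st.2 (miss + 1) then
        (PySem.Set.discard st.1 miss, PySem.Set.discard st.2 (miss + 1))
      else st)
    (lost_set, reserve_set)
  n - (st.1.length : Int)

-- ===== PORT B =====
-- Source B's while loop over indices i, j is ported as the obvious structural
-- recursion on the suffixes L[i:], R[j:] (exact: each iteration advances
-- i, j, or both, which is the corresponding recursive call).
def tpGo (L : List Int) (R : List Int) : Int :=
  match L, R with
  | [], _ => 0
  | _ :: _, [] => 0
  | l :: ls, r :: rs =>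
      if |l - r| ≤ 1 then 1 + tpGo ls rs
      else if r < l then tpGo (l :: ls) rs
      else tpGo ls (r :: rs)
  termination_by L.length + R.length
  decreasing_by all_goals (simp only [List.length_cons]; omega)

def solution_alt (n : Int) (lost : List Int) (reserve : List Int) : Int :=
  let L := PySem.List.sorted (PySem.Set.diff (PySem.Set.ofList lost) (PySem.Set.ofList reserve)) (fun x => x) false
  let R := PySem.List.sorted (PySem.Set.diff (PySem.Set.ofList reserve) (PySem.Set.ofList lost)) (fun x => x) false
  n - (L.length : Int) + tpGo L R

-- ===== PRECONDITION & SPEC =====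
def Spec_solution (n : Int) (lost : List Int) (reserve : List Int) (out : Int) : Prop := out = solution_alt n lost reserve
instance (n : Int) (lost : List Int) (reserve : List Int) (out : Int) : Decidable (Spec_solution n lost reserve out) := by unfold Spec_solution; infer_instance

-- ===== CLAIM (what is proved, stated in full; the proofs are below) =====
def Claim_equal_solution : Prop := ∀ (n : Int) (lost : List Int) (reserve : List Int), Dom_solution n lost reserve → Spec_solution n lost reserve (solution n lost reserve)

-- ===== LEMMAS AND PROOFS =====

-- name for A's literal loop body
def stepA : PySem.Set Int × PySem.Set Int → Int → PySem.Set Int × PySem.Set Int :=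
  fun st miss =>
    if PySem.Set.contains st.2 (miss - 1) then
      (PySem.Set.discard st.1 miss, PySem.Set.discard st.2 (miss - 1))
    else if PySem.Set.contains st.2 (miss + 1) then
      (PySem.Set.discard st.1 miss, PySem.Set.discard st.2 (miss + 1))
    else st

lemma stepA_lam :
    (fun (st : PySem.Set Int × PySem.Set Int) miss =>
      if PySem.Set.contains st.2 (miss - 1) then
        (PySem.Set.discard st.1 miss, PySem.Set.discard st.2 (miss - 1))
      else if PySem.Set.contains st.2 (miss + 1) then
        (PySem.Set.discard st.1 miss, PySem.Set.discard st.2 (miss + 1))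
      else st) = stepA := rfl

-- the number of matches A's loop makes, as a function of worklist and reserve set
def gA : List Int → List Int → Nat
  | [], _ => 0
  | m :: M, rs =>
    if PySem.Set.contains rs (m - 1) then 1 + gA M (PySem.Set.discard rs (m - 1))
    else if PySem.Set.contains rs (m + 1) then 1 + gA M (PySem.Set.discard rs (m + 1))
    else gA M rs

lemma discard_cons_ne (r : Int) (R : List Int) (y : Int) (h : r ≠ y) :
    PySem.Set.discard (r :: R) y = r :: PySem.Set.discard R y := by
  simp [PySem.Set.discard, h]

lemma discard_of_not_mem (s : List Int) (y : Int) (h : y ∉ s) :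
    PySem.Set.discard s y = s := by
  unfold PySem.Set.discard
  refine List.filter_eq_self.mpr (fun x hx => ?_)
  simp only [Bool.not_eq_eq_eq_not, Bool.not_true, beq_eq_false_iff_ne, ne_eq]
  exact fun e => h (e ▸ hx)

lemma length_discard_mem (s : List Int) (x : Int) (hn : s.Nodup) (hx : x ∈ s) :
    (PySem.Set.discard s x).length + 1 = s.length := by
  induction s with
  | nil => cases hx
  | cons a t ih =>
      have hnd := List.nodup_cons.mp hn
      by_cases hax : a = x
      · subst hax
        have hds : PySem.Set.discard (a :: t) a = t := by
          have h1 : PySem.Set.discard (a :: t) a = PySem.Set.discard t a := by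
            simp [PySem.Set.discard]
          rw [h1, discard_of_not_mem t a hnd.1]
        simp [hds]
      · have hxt : x ∈ t := by
          rcases List.mem_cons.mp hx with h | h
          · exact absurd h.symm hax
          · exact h
        rw [discard_cons_ne a t x hax]
        have := ih hnd.2 hxt
        simp only [List.length_cons]
        omega

lemma contains_congr (rs rs' : List Int) (hp : rs.Perm rs') (y : Int) :
    PySem.Set.contains rs y = PySem.Set.contains rs' y := by
  by_cases h : y ∈ rs
  · rw [(PySem.Set.contains_iff rs y).mpr h,
        (PySem.Set.contains_iff rs' y).mpr (hp.mem_iff.mp h)]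
  · have h' : y ∉ rs' := fun hc => h (hp.mem_iff.mpr hc)
    cases hb : PySem.Set.contains rs y with
    | false =>
        cases hb' : PySem.Set.contains rs' y with
        | false => rfl
        | true => exact absurd ((PySem.Set.contains_iff rs' y).mp hb') h'
    | true => exact absurd ((PySem.Set.contains_iff rs y).mp hb) h

lemma gA_perm (M : List Int) : ∀ (rs rs' : List Int), rs.Perm rs' →
    gA M rs = gA M rs' := by
  induction M with
  | nil => intro rs rs' _; rfl
  | cons m M ih =>
      intro rs rs' hp
      simp only [gA, contains_congr rs rs' hp]
      split_ifs with h1 h2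
      · have := ih (PySem.Set.discard rs (m - 1)) (PySem.Set.discard rs' (m - 1)) (hp.filter _)
        omega
      · have := ih (PySem.Set.discard rs (m + 1)) (PySem.Set.discard rs' (m + 1)) (hp.filter _)
        omega
      · exact ih _ _ hp

lemma gA_nil (M : List Int) : gA M [] = 0 := by
  induction M with
  | nil => rfl
  | cons m M ih => simpa [gA, PySem.Set.contains] using ih

lemma gA_irrel (M : List Int) (r : Int) : ∀ (R : List Int),
    (∀ m ∈ M, r < m - 1) → gA M (r :: R) = gA M R := by
  induction M with
  | nil => intro R _; rfl
  | cons m M ih =>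
      intro R h
      have hm : r < m - 1 := h m List.mem_cons_self
      have h1 : r ≠ m - 1 := by omega
      have h2 : r ≠ m + 1 := by omega
      have hc1 : PySem.Set.contains (r :: R) (m - 1) = PySem.Set.contains R (m - 1) := by
        simp [PySem.Set.contains]
        exact fun e => absurd e.symm h1
      have hc2 : PySem.Set.contains (r :: R) (m + 1) = PySem.Set.contains R (m + 1) := by
        simp [PySem.Set.contains]
        exact fun e => absurd e.symm h2
      have ht : ∀ m' ∈ M, r < m' - 1 := fun m' hm' => h m' (List.mem_cons_of_mem _ hm')
      simp only [gA, hc1, hc2, discard_cons_ne r R (m - 1) h1, discard_cons_ne r R (m + 1) h2]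
      split_ifs with hb1 hb2
      · rw [ih _ ht]
      · rw [ih _ ht]
      · exact ih _ ht

-- A's loop removes one element from the lost set per match
lemma foldA_length : ∀ (M ls rs : List Int), (∀ x ∈ M, x ∈ ls) → M.Nodup → ls.Nodup →
    (M.foldl stepA (ls, rs)).1.length + gA M rs = ls.length := by
  intro M
  induction M with
  | nil => intro ls rs _ _ _; rfl
  | cons m M ih =>
      intro ls rs hmem hnd hlsnd
      have hnd' := List.nodup_cons.mp hnd
      have hmls : m ∈ ls := hmem m List.mem_cons_self
      have hsub : ∀ x ∈ M, x ∈ PySem.Set.discard ls m := by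
        intro x hx
        exact (PySem.Set.mem_discard ls m x).mpr
          ⟨hmem x (List.mem_cons_of_mem _ hx), fun e => hnd'.1 (e ▸ hx)⟩
      have hlen := length_discard_mem ls m hlsnd hmls
      have hdn := PySem.Set.nodup_discard ls m hlsnd
      simp only [List.foldl_cons, gA, stepA]
      split_ifs with h1 h2
      · have := ih (PySem.Set.discard ls m) (PySem.Set.discard rs (m - 1)) hsub hnd'.2 hdn
        omega
      · have := ih (PySem.Set.discard ls m) (PySem.Set.discard rs (m + 1)) hsub hnd'.2 hdn
        omega
      · exact ih ls rs (fun x hx => hmem x (List.mem_cons_of_mem _ hx)) hnd'.2 hlsnd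

-- the heart: A's greedy match count equals the two-pointer match count,
-- for strictly increasing disjoint lists
theorem gA_eq_tpGo (M R : List Int) (hM : M.Pairwise (· < ·)) (hR : R.Pairwise (· < ·))
    (hd : ∀ m ∈ M, m ∉ R) : (gA M R : Int) = tpGo M R := by
  match M, R with
  | [], R => simp [gA, tpGo]
  | m :: M, [] => simp [gA_nil, tpGo]
  | m :: M, r :: R =>
      have hMp := List.pairwise_cons.mp hM
      have hRp := List.pairwise_cons.mp hR
      have hne : m ≠ r := fun e => hd m List.mem_cons_self (e ▸ List.mem_cons_self)
      by_cases hcase : r < m - 1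
      · -- r is too small to ever be used: both sides drop it
        have habs : ¬ |m - r| ≤ 1 := by rw [abs_le]; omega
        have hirr : ∀ m' ∈ m :: M, r < m' - 1 := by
          intro m' hm'
          rcases List.mem_cons.mp hm' with h | h
          · omega
          · have := hMp.1 m' h; omega
        rw [gA_irrel _ _ _ hirr]
        rw [show tpGo (m :: M) (r :: R) = tpGo (m :: M) R by
          rw [tpGo]; rw [if_neg habs, if_pos (by omega)]]
        exact gA_eq_tpGo (m :: M) R hM hRp.2
          (fun m' hm' hc => hd m' hm' (List.mem_cons_of_mem _ hc))
      · by_cases hc1 : r = m - 1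
        · -- match with the front neighbour
          have hm1R : m - 1 ∉ R := fun hc => by have := hRp.1 _ hc; omega
          have hcon : PySem.Set.contains (r :: R) (m - 1) = true :=
            (PySem.Set.contains_iff _ _).mpr (by rw [hc1]; exact List.mem_cons_self)
          have hdis : PySem.Set.discard (r :: R) (m - 1) = R := by
            rw [hc1] at *
            rw [show PySem.Set.discard ((m - 1) :: R) (m - 1)
                  = PySem.Set.discard R (m - 1) by
              simp [PySem.Set.discard]]
            exact discard_of_not_mem R (m - 1) hm1R
          rw [show gA (m :: M) (r :: R) = 1 + gA M R by
            simp only [gA, hcon, if_true, hdis]]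
          rw [show tpGo (m :: M) (r :: R) = 1 + tpGo M R by
            rw [tpGo]; rw [if_pos (by rw [abs_le]; omega)]]
          have := gA_eq_tpGo M R hMp.2 hRp.2
            (fun m' hm' hc => hd m' (List.mem_cons_of_mem _ hm') (List.mem_cons_of_mem _ hc))
          omega
        · have hrm : m + 1 ≤ r := by omega
          by_cases hc2 : r = m + 1
          · -- match with the back neighbour
            have hm1 : m - 1 ∉ r :: R := by
              intro hc
              rcases List.mem_cons.mp hc with h | h
              · omega
              · have := hRp.1 _ h; omega
            have hcon1 : PySem.Set.contains (r :: R) (m - 1) = false := by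
              cases hb : PySem.Set.contains (r :: R) (m - 1) with
              | false => rfl
              | true => exact absurd ((PySem.Set.contains_iff _ _).mp hb) hm1
            have hcon2 : PySem.Set.contains (r :: R) (m + 1) = true :=
              (PySem.Set.contains_iff _ _).mpr (by rw [hc2]; exact List.mem_cons_self)
            have hm1R : m + 1 ∉ R := fun hc => by
              have := hRp.1 _ hc; omega
            have hdis : PySem.Set.discard (r :: R) (m + 1) = R := by
              rw [hc2] at *
              rw [show PySem.Set.discard ((m + 1) :: R) (m + 1)
                    = PySem.Set.discard R (m + 1) by
                simp [PySem.Set.discard]]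
              exact discard_of_not_mem R (m + 1) hm1R
            rw [show gA (m :: M) (r :: R) = 1 + gA M R by
              simp only [gA, hcon1, Bool.false_eq_true, if_false, hcon2, if_true, hdis]]
            rw [show tpGo (m :: M) (r :: R) = 1 + tpGo M R by
              rw [tpGo]; rw [if_pos (by rw [abs_le]; omega)]]
            have := gA_eq_tpGo M R hMp.2 hRp.2
              (fun m' hm' hc => hd m' (List.mem_cons_of_mem _ hm') (List.mem_cons_of_mem _ hc))
            omega
          · -- r far to the right: no match for m at all
            have hgt : m + 1 < r := by omega
            have hm1 : m - 1 ∉ r :: R := by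
              intro hc
              rcases List.mem_cons.mp hc with h | h
              · omega
              · have := hRp.1 _ h; omega
            have hm2 : m + 1 ∉ r :: R := by
              intro hc
              rcases List.mem_cons.mp hc with h | h
              · omega
              · have := hRp.1 _ h; omega
            have hcon1 : PySem.Set.contains (r :: R) (m - 1) = false := by
              cases hb : PySem.Set.contains (r :: R) (m - 1) with
              | false => rfl
              | true => exact absurd ((PySem.Set.contains_iff _ _).mp hb) hm1
            have hcon2 : PySem.Set.contains (r :: R) (m + 1) = false := by
              cases hb : PySem.Set.contains (r :: R) (m + 1) with
              | false => rfl
              | true => exact absurd ((PySem.Set.contains_iff _ _).mp hb) hm2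
            rw [show gA (m :: M) (r :: R) = gA M (r :: R) by
              simp only [gA, hcon1, hcon2, Bool.false_eq_true, if_false]]
            rw [show tpGo (m :: M) (r :: R) = tpGo M (r :: R) by
              rw [tpGo]; rw [if_neg (by rw [abs_le]; omega), if_neg (by omega)]]
            exact gA_eq_tpGo M (r :: R) hMp.2 hR
              (fun m' hm' hc => hd m' (List.mem_cons_of_mem _ hm') hc)
  termination_by M.length + R.length
  decreasing_by all_goals (simp only [List.length_cons]; omega)

lemma pairwise_lt_sorted (xs : List Int) (h : xs.Nodup) :
    (PySem.List.sorted xs (fun x => x) false).Pairwise (· < ·) := by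
  have h1 := PySem.List.sorted_pairwise xs (fun x => x)
  have h2 : (PySem.List.sorted xs (fun x => x) false).Nodup :=
    (PySem.List.sorted_perm xs (fun x => x) false).symm.nodup h
  exact (h1.and h2).imp (fun hp => lt_of_le_of_ne hp.1 hp.2)

lemma final_arith (n : Int) (a g LL : Nat) (t : Int) (h1 : a + g = LL) (h2 : (g : Int) = t) :
    n - (a : Int) = n - (LL : Int) + t := by omega

lemma main_eq (n : Int) (lost reserve : List Int) :
    solution n lost reserve = solution_alt n lost reserve := by
  have hLnd : (PySem.Set.diff (PySem.Set.ofList lost) (PySem.Set.ofList reserve) : List Int).Nodup :=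
    PySem.Set.nodup_diff _ _ (PySem.Set.nodup_ofList lost)
  have hRnd : (PySem.Set.diff (PySem.Set.ofList reserve) (PySem.Set.ofList lost) : List Int).Nodup :=
    PySem.Set.nodup_diff _ _ (PySem.Set.nodup_ofList reserve)
  have hLperm := PySem.List.sorted_perm
    (PySem.Set.diff (PySem.Set.ofList lost) (PySem.Set.ofList reserve)) (fun x => x) false
  have hRperm := PySem.List.sorted_perm
    (PySem.Set.diff (PySem.Set.ofList reserve) (PySem.Set.ofList lost)) (fun x => x) false
  have hfold := foldA_length
    (PySem.List.sorted (PySem.Set.diff (PySem.Set.ofList lost) (PySem.Set.ofList reserve)) (fun x => x) false)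
    (PySem.Set.diff (PySem.Set.ofList lost) (PySem.Set.ofList reserve))
    (PySem.Set.diff (PySem.Set.ofList reserve) (PySem.Set.ofList lost))
    (fun x hx => (PySem.List.mem_sorted _ _ _ _).mp hx)
    (hLperm.symm.nodup hLnd) hLnd
  have hgperm := gA_perm
    (PySem.List.sorted (PySem.Set.diff (PySem.Set.ofList lost) (PySem.Set.ofList reserve)) (fun x => x) false)
    (PySem.Set.diff (PySem.Set.ofList reserve) (PySem.Set.ofList lost))
    (PySem.List.sorted (PySem.Set.diff (PySem.Set.ofList reserve) (PySem.Set.ofList lost)) (fun x => x) false)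
    hRperm.symm
  have hdisj : ∀ m ∈ PySem.List.sorted (PySem.Set.diff (PySem.Set.ofList lost) (PySem.Set.ofList reserve)) (fun x => x) false,
      m ∉ PySem.List.sorted (PySem.Set.diff (PySem.Set.ofList reserve) (PySem.Set.ofList lost)) (fun x => x) false := by
    intro m hm hc
    have h1 := (PySem.Set.mem_diff _ _ m).mp ((PySem.List.mem_sorted _ _ _ _).mp hm)
    have h2 := (PySem.Set.mem_diff _ _ m).mp ((PySem.List.mem_sorted _ _ _ _).mp hc)
    exact h2.2 h1.1
  have htp := gA_eq_tpGo
    (PySem.List.sorted (PySem.Set.diff (PySem.Set.ofList lost) (PySem.Set.ofList reserve)) (fun x => x) false)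
    (PySem.List.sorted (PySem.Set.diff (PySem.Set.ofList reserve) (PySem.Set.ofList lost)) (fun x => x) false)
    (pairwise_lt_sorted _ hLnd) (pairwise_lt_sorted _ hRnd) hdisj
  have hlen : (PySem.List.sorted (PySem.Set.diff (PySem.Set.ofList lost) (PySem.Set.ofList reserve)) (fun x => x) false).length
      = (PySem.Set.diff (PySem.Set.ofList lost) (PySem.Set.ofList reserve) : List Int).length :=
    hLperm.length_eq
  simp only [solution, solution_alt, stepA_lam]
  rw [hgperm] at hfold
  rw [hlen]
  exact final_arith n _ _ _ _ hfold htp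

-- ===== VERDICT (by name: the statement is the Claim_ definition above) =====
theorem solution_spec : Claim_equal_solution := by
  intro n lost reserve _
  exact main_eq n lost reserve
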